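-- pv_equiv track=rewrite | github.com/pinqian77/11-868-llmsys-24s | llmsys_s24_hw4/pipeline/pipe.py | _clock_cycles
-- ===== SOURCE A (Python) =====
-- from typing import Any, Iterable, Iterator, List, Optional, Union, Sequence, Tuple, cast
--
-- def _clock_cycles(num_batches: int, num_partitions: int) -> Iterable[List[Tuple[int, int]]]:
--     '''Generate schedules for each clock cycle.
--
--     An example of the generated schedule for m=3 and n=3 is as follows:
--
--     k (i,j) (i,j) (i,j)
--     - ----- ----- -----
--     0 (0,0)
--     1 (1,0) (0,1)
--     2 (2,0) (1,1) (0,2)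
--     3       (2,1) (1,2)
--     4             (2,2)
--
--     where k is the clock number, i is the index of micro-batch, and j is the index of partition.
--
--     Each schedule is a list of tuples. Each tuple contains the index of micro-batch and the index of partition.
--     This function should yield schedules for each clock cycle.
--     '''
--     # BEGIN SOLUTION
--     total_clock_cycles = num_batches + num_partitions - 1
--
--     schedule = []
--     for clock_cycle in range(total_clock_cycles):
--         jobs = []
--         for partition_idx in range(num_partitions):
--             micro_batch_idx = clock_cycle - partition_idx
--             if micro_batch_idx >= 0 and micro_batch_idx < num_batches:
--                 jobs.append((micro_batch_idx, partition_idx))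
--         schedule.append(jobs)
--
--     return schedule
-- ===== SOURCE B (Python) =====
-- def _clock_cycles(num_batches: int, num_partitions: int):
--     # Scatter approach: preallocate one bucket per clock cycle, then place each
--     # (micro-batch i, partition j) pair once into bucket i + j.  Outer loop over
--     # partitions, inner over micro-batches, so each bucket fills in increasing
--     # partition order.
--     schedule = [[] for _ in range(num_batches + num_partitions - 1)]
--     for j in range(num_partitions):
--         for i in range(num_batches):
--             schedule[i + j].append((i, j))
--     return schedule
-- ===== Notes on version B (the rewrite author's own statement) =====
-- stated objective: alternative
-- what changed: B preallocates the num_batches+num_partitions-1 clock-cycle buckets and then scatters each (micro-batch, partition) pair exactly once into bucket i+j (partition-major order), instead of A's per-cycle scan over all partitions with a bounds filter.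
import Mathlib
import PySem

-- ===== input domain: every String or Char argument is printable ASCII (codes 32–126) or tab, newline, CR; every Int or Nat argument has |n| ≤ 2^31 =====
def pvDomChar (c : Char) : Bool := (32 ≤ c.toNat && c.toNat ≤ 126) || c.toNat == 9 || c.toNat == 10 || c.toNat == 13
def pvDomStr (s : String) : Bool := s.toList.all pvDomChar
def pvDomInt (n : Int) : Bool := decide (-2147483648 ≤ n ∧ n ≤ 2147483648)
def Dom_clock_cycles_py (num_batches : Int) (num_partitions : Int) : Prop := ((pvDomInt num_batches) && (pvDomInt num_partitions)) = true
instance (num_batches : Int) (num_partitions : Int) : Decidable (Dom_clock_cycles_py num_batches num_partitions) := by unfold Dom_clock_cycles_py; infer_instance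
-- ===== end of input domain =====

-- B preallocates the clock-cycle buckets and scatters each (micro-batch, partition)
-- pair once into bucket i+j, instead of A's per-cycle scan over all partitions with
-- a bounds filter (objective: alternative decomposition; A is total, same output).

-- ===== PORT A =====
def clock_cycles_py (num_batches : Int) (num_partitions : Int) : List (List (Int × Int)) :=
  (PySem.List.pyRange 0 (num_batches + num_partitions - 1) 1).foldl
    (fun schedule clock_cycle =>
      schedule ++ [(PySem.List.pyRange 0 num_partitions 1).foldl
        (fun jobs partition_idx =>
          if 0 ≤ clock_cycle - partition_idx ∧ clock_cycle - partition_idx < num_batches then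
            jobs ++ [(clock_cycle - partition_idx, partition_idx)]
          else jobs) []])
    []

-- ===== PORT B =====
-- `schedule[i + j].append(...)`: i and j come from range(...), so i + j ≥ 0 and the
-- Python index never wraps; `(i + j).toNat` with `List.modify` is exact here.
def clock_cycles_py_alt (num_batches : Int) (num_partitions : Int) : List (List (Int × Int)) :=
  (PySem.List.pyRange 0 num_partitions 1).foldl
    (fun schedule j =>
      (PySem.List.pyRange 0 num_batches 1).foldl
        (fun s i => s.modify (i + j).toNat (fun row => row ++ [(i, j)])) schedule)
    (List.replicate (num_batches + num_partitions - 1).toNat [])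

-- ===== PRECONDITION & SPEC =====
def Spec_clock_cycles_py (num_batches : Int) (num_partitions : Int) (out : List (List (Int × Int))) : Prop := out = clock_cycles_py_alt num_batches num_partitions
instance (num_batches : Int) (num_partitions : Int) (out : List (List (Int × Int))) : Decidable (Spec_clock_cycles_py num_batches num_partitions out) := by unfold Spec_clock_cycles_py; infer_instance

-- ===== CLAIM (what is proved, stated in full; the proofs are below) =====
def Claim_equal_clock_cycles_py : Prop := ∀ (num_batches : Int) (num_partitions : Int), Dom_clock_cycles_py num_batches num_partitions → Spec_clock_cycles_py num_batches num_partitions (clock_cycles_py num_batches num_partitions)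

-- ===== LEMMAS AND PROOFS =====

-- Filtering an ascending integer range by an interval predicate yields the clipped range.
theorem filter_pyRange_interval (a b lo hi : Int) :
    (PySem.List.pyRange a b 1).filter (fun j => decide (lo ≤ j ∧ j < hi)) =
      PySem.List.pyRange (max a lo) (min b hi) 1 := by
  apply List.Perm.eq_of_pairwise (le := (· ≤ · : Int → Int → Prop))
  · intro x y _ _ hxy hyx; omega
  · exact List.Pairwise.filter _
      ((PySem.List.pairwise_lt_pyRange_one a b).imp fun h => le_of_lt h)
  · exact (PySem.List.pairwise_lt_pyRange_one _ _).imp fun h => le_of_lt h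
  · rw [List.perm_ext_iff_of_nodup ((PySem.List.nodup_pyRange_one a b).filter _)
      (PySem.List.nodup_pyRange_one _ _)]
    intro x
    simp [List.mem_filter, PySem.List.mem_pyRange_one]
    omega

-- Filtering an ascending range by an equality test keeps at most the one element.
theorem filter_pyRange_eq (a b v : Int) :
    (PySem.List.pyRange a b 1).filter (fun i => decide (i = v)) =
      if a ≤ v ∧ v < b then [v] else [] := by
  have hp : (fun i => decide (i = v)) = (fun i => decide (v ≤ i ∧ i < v + 1)) := by
    funext i; rw [decide_eq_decide]; omega
  rw [hp, filter_pyRange_interval]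
  split_ifs with h
  · have h1 : max a v = v := by omega
    have h2 : min b (v + 1) = v + 1 := by omega
    rw [h1, h2, PySem.List.pyRange_one_singleton]
  · exact PySem.List.pyRange_one_eq_nil (by omega)

-- For a fixed clock cycle k, A's inner scan-and-filter yields the clipped diagonal.
theorem row_eq (m n k : Int) :
    (PySem.List.pyRange 0 n 1).foldl
      (fun jobs j => if 0 ≤ k - j ∧ k - j < m then jobs ++ [(k - j, j)] else jobs) [] =
    (PySem.List.pyRange (max 0 (k - m + 1)) (min n (k + 1)) 1).map (fun j => (k - j, j)) := by
  have h := PySem.List.foldl_append_if (l := PySem.List.pyRange 0 n 1)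
      (p := fun j => decide (0 ≤ k - j ∧ k - j < m)) (f := fun j => (k - j, j)) (acc := [])
  simp only [decide_eq_true_eq] at h
  rw [h, List.nil_append]
  have hp : (fun j => decide (0 ≤ k - j ∧ k - j < m)) = (fun j => decide (k - m + 1 ≤ j ∧ j < k + 1)) := by
    funext j; rw [decide_eq_decide]; omega
  rw [hp, filter_pyRange_interval]

-- A's outer loop is a map over the clock cycles.
theorem foldl_append_singleton {α β : Type} (L : List α) (f : α → β) (acc : List β) :
    L.foldl (fun s x => s ++ [f x]) acc = acc ++ L.map f := by
  induction L generalizing acc with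
  | nil => simp
  | cons x L ih => simp [List.foldl_cons, ih]

-- Effect of one scatter pass (fixed partition j) on bucket k.
theorem inner_scatter_get? (m j : Int) (hj : 0 ≤ j) (sched : List (List (Int × Int))) (k : Nat) :
    ((PySem.List.pyRange 0 m 1).foldl
        (fun s i => s.modify (i + j).toNat (fun row => row ++ [(i, j)])) sched)[k]? =
      sched[k]?.map (fun row =>
        row ++ ((PySem.List.pyRange 0 m 1).filter (fun i => decide (i = (k : Int) - j))).map
          (fun i => (i, j))) := by
  have key : ∀ (L : List Int), (∀ i ∈ L, 0 ≤ i) → ∀ (sched : List (List (Int × Int))),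
      (L.foldl (fun s i => s.modify (i + j).toNat (fun row => row ++ [(i, j)])) sched)[k]? =
      sched[k]?.map (fun row =>
        row ++ (L.filter (fun i => decide (i = (k : Int) - j))).map (fun i => (i, j))) := by
    intro L
    induction L with
    | nil => intro _ sched; cases h : sched[k]? <;> simp [h]
    | cons x L ih =>
      intro hpos sched
      have hx : 0 ≤ x := hpos x (by simp)
      rw [List.foldl_cons, ih (fun i hi => hpos i (by simp [hi])), List.getElem?_modify,
          List.filter_cons]
      by_cases hxk : x = (k : Int) - j
      · have hnat : (x + j).toNat = k := by omega
        cases h : sched[k]? with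
        | none => simp [h]
        | some row => simp [h, hnat, hxk]
      · have hnat : (x + j).toNat ≠ k := by omega
        cases h : sched[k]? with
        | none => simp [h]
        | some row => simp [h, hnat, hxk]
  exact key _ (fun i hi => by have := (PySem.List.mem_pyRange_one).1 hi; omega) sched

-- Effect of the whole scatter (all partitions in J) on bucket k.
theorem outer_scatter_get? (m : Int) (J : List Int) (hJ : ∀ j ∈ J, 0 ≤ j)
    (sched : List (List (Int × Int))) (k : Nat) :
    (J.foldl (fun sched j =>
        (PySem.List.pyRange 0 m 1).foldl
          (fun s i => s.modify (i + j).toNat (fun row => row ++ [(i, j)])) sched) sched)[k]? =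
      sched[k]?.map (fun row =>
        row ++ (J.filter (fun j => decide (0 ≤ (k : Int) - j ∧ (k : Int) - j < m))).map
          (fun j => ((k : Int) - j, j))) := by
  induction J generalizing sched with
  | nil => cases h : sched[k]? <;> simp [h]
  | cons j J ih =>
    have hj : 0 ≤ j := hJ j (by simp)
    rw [List.foldl_cons, ih (fun x hx => hJ x (by simp [hx])),
        inner_scatter_get? m j hj sched k, filter_pyRange_eq, List.filter_cons]
    cases h : sched[k]? with
    | none => simp [h]
    | some row =>
      simp only [h, Option.map_some, Option.some.injEq, decide_eq_true_eq]
      split_ifs with h1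
      · simp [List.append_assoc]
      · simp

-- ===== VERDICT (by name: the statement is the Claim_ definition above) =====
theorem clock_cycles_py_spec : Claim_equal_clock_cycles_py := by
  intro m n _
  unfold Spec_clock_cycles_py clock_cycles_py clock_cycles_py_alt
  rw [foldl_append_singleton, List.nil_append]
  have hrow : (fun clock_cycle => (PySem.List.pyRange 0 n 1).foldl
      (fun jobs partition_idx =>
        if 0 ≤ clock_cycle - partition_idx ∧ clock_cycle - partition_idx < m then
          jobs ++ [(clock_cycle - partition_idx, partition_idx)]
        else jobs) []) =
      (fun k => (PySem.List.pyRange (max 0 (k - m + 1)) (min n (k + 1)) 1).map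
        (fun j => (k - j, j))) := funext (row_eq m n)
  rw [hrow]
  apply List.ext_getElem?
  intro k
  rw [List.getElem?_map,
      outer_scatter_get? m (PySem.List.pyRange 0 n 1)
        (fun j hj => by have := (PySem.List.mem_pyRange_one).1 hj; omega) _ k,
      List.getElem?_replicate, PySem.List.getElem?_pyRange_one]
  by_cases hk : k < (m + n - 1).toNat
  · rw [if_pos (by omega), if_pos hk]
    have hp : (fun j => decide (0 ≤ (k : Int) - j ∧ (k : Int) - j < m)) =
        (fun j => decide ((k : Int) - m + 1 ≤ j ∧ j < (k : Int) + 1)) := by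
      funext j; rw [decide_eq_decide]; omega
    rw [hp, filter_pyRange_interval]
    simp
  · rw [if_neg (by omega), if_neg hk]
    simp
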